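-- pv_equiv track=rewrite | github.com/patrickdeanbrown/pixel_drawing | pixel_drawing/styles/style_manager.py | _apply_high_contrast_modifications
-- ===== SOURCE A (Python) =====
-- def _apply_high_contrast_modifications(stylesheet: str) -> str:
--     """Apply high contrast theme modifications to base stylesheet."""
--     # High contrast theme with stark black/white/yellow
--     hc_replacements = {
--         '#F8F9FA': '#000000',  # Main background
--         '#FFFFFF': '#000000',  # Panel background
--         '#202124': '#FFFFFF',  # Primary text
--         '#A020F0': '#FFFF00',  # Primary accent (yellow for visibility)
--         '#E8EAED': '#FFFFFF',  # Borders
--         '#DADCE0': '#FFFFFF',  # Borders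
--     }
--
--     modified = stylesheet
--     for old_color, new_color in hc_replacements.items():
--         modified = modified.replace(old_color, new_color)
--
--     return modified
-- ===== SOURCE B (Python) =====
-- def _apply_high_contrast_modifications(stylesheet: str) -> str:
--     """Apply high contrast theme modifications in a single left-to-right scan."""
--     hc_replacements = {
--         '#F8F9FA': '#000000',  # Main background
--         '#FFFFFF': '#000000',  # Panel background
--         '#202124': '#FFFFFF',  # Primary text
--         '#A020F0': '#FFFF00',  # Primary accent (yellow for visibility)
--         '#E8EAED': '#FFFFFF',  # Borders
--         '#DADCE0': '#FFFFFF',  # Borders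
--     }
--
--     out = []
--     i = 0
--     n = len(stylesheet)
--     while i < n:
--         repl = hc_replacements.get(stylesheet[i:i + 7])
--         if repl is not None:
--             out.append(repl)
--             i += 7
--         else:
--             out.append(stylesheet[i])
--             i += 1
--     return ''.join(out)
-- ===== Notes on version B (the rewrite author's own statement) =====
-- stated objective: alternative
-- what changed: B replaces six sequential full-string str.replace passes by one left-to-right scan that at each position looks up the next 7-character slice in the replacement dict (safe because no key or produced value can overlap or re-match another key).
import Mathlib
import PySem

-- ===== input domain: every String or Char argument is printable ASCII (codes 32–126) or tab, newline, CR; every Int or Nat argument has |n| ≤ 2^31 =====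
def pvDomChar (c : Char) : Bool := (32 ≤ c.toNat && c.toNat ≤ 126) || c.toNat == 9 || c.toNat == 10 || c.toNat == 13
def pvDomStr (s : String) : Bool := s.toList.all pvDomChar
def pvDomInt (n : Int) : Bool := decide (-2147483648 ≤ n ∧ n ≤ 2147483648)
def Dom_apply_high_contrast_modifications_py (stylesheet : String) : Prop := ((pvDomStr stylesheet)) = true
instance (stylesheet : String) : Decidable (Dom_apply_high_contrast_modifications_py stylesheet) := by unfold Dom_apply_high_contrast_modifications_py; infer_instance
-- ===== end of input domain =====

-- B replaces six sequential full-string replace passes by one left-to-right scan with a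
-- 7-character-slice dict lookup (alternative decomposition; same exact output).


-- ===== PORT A =====
-- the dict literal hc_replacements
def hcA : PySem.Dict String String := PySem.Dict.mk
  [("#F8F9FA", "#000000"), ("#FFFFFF", "#000000"), ("#202124", "#FFFFFF"),
   ("#A020F0", "#FFFF00"), ("#E8EAED", "#FFFFFF"), ("#DADCE0", "#FFFFFF")]

-- for old_color, new_color in hc_replacements.items(): modified = modified.replace(old_color, new_color)
def apply_high_contrast_modifications_py (stylesheet : String) : String :=
  hcA.items.foldl (fun modified kv => PySem.Str.replace modified kv.1 kv.2) stylesheet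

-- ===== PORT B =====
def hcB : PySem.Dict String String := PySem.Dict.mk
  [("#F8F9FA", "#000000"), ("#FFFFFF", "#000000"), ("#202124", "#FFFFFF"),
   ("#A020F0", "#FFFF00"), ("#E8EAED", "#FFFFFF"), ("#DADCE0", "#FFFFFF")]

-- the while loop of Source B: one scan; at each index look up the next 7-char slice in the dict
def hcScan (s : List Char) : List Char :=
  match s with
  | [] => []
  | c :: t =>
    match hcB.get? (String.ofList (List.take 7 (c :: t))) with
    | some v => v.toList ++ hcScan (List.drop 6 t)
    | none => c :: hcScan t
termination_by s.length
decreasing_by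
  · simp only [List.length_cons, List.length_drop]; omega
  · simp

def apply_high_contrast_modifications_py_alt (stylesheet : String) : String :=
  String.ofList (hcScan stylesheet.toList)

-- ===== PRECONDITION & SPEC =====
def Spec_apply_high_contrast_modifications_py (stylesheet : String) (out : String) : Prop := out = apply_high_contrast_modifications_py_alt stylesheet
instance (stylesheet : String) (out : String) : Decidable (Spec_apply_high_contrast_modifications_py stylesheet out) := by unfold Spec_apply_high_contrast_modifications_py; infer_instance

-- ===== CLAIM (what is proved, stated in full; the proofs are below) =====
def Claim_equal_apply_high_contrast_modifications_py : Prop := ∀ (stylesheet : String), Dom_apply_high_contrast_modifications_py stylesheet → Spec_apply_high_contrast_modifications_py stylesheet (apply_high_contrast_modifications_py stylesheet)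

-- ===== LEMMAS AND PROOFS =====

-- fuel-free single-pattern replace (proof-side model of PySem.Chars.replace.go)
def rep1 (p r : List Char) (s : List Char) : List Char :=
  match s with
  | [] => []
  | c :: t =>
    if p.isPrefixOf (c :: t) then r ++ rep1 p r (t.drop (p.length - 1))
    else c :: rep1 p r t
termination_by s.length
decreasing_by
  · simp only [List.length_cons, List.length_drop]; omega
  · simp

theorem rep1_nil (p r : List Char) : rep1 p r [] = [] := by rw [rep1]

-- left fold of rep1 over a pair list (the shape of port A)
def chainL (L : List (List Char × List Char)) (s : List Char) : List Char :=
  L.foldl (fun m pr => rep1 pr.1 pr.2 m) s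

theorem go_eq_rep1 (p r : List Char) (hp : p ≠ []) :
    ∀ (fuel : Nat) (l acc : List Char), l.length ≤ fuel →
      PySem.Chars.replace.go p r fuel l acc = acc.reverse ++ rep1 p r l := by
  intro fuel
  induction fuel with
  | zero =>
    intro l acc hl
    have hl0 : l = [] := List.eq_nil_of_length_eq_zero (Nat.le_zero.mp hl)
    subst hl0
    simp [PySem.Chars.replace.go, rep1]
  | succ n ih =>
    intro l acc hl
    match l with
    | [] => simp [PySem.Chars.replace.go, rep1]
    | c :: t =>
      by_cases h : p.isPrefixOf (c :: t)
      · have hdrop : List.drop p.length (c :: t) = t.drop (p.length - 1) := by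
          rcases p with _ | ⟨a, p'⟩
          · exact absurd rfl hp
          · simp
        have hlen : (t.drop (p.length - 1)).length ≤ n := by
          rw [List.length_drop]
          simp only [List.length_cons] at hl
          omega
        rw [PySem.Chars.replace.go]
        simp only [h, if_true]
        rw [hdrop, ih _ _ hlen]
        rw [rep1]
        simp [h]
      · rw [PySem.Chars.replace.go]
        simp only [h]
        rw [ih t (c :: acc) (by simp only [List.length_cons] at hl; omega)]
        rw [rep1]
        simp [h]

theorem replace_eq_rep1 (p r s : List Char) (hp : p ≠ []) :
    PySem.Chars.replace s p r = rep1 p r s := by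
  rw [PySem.Chars.replace]
  have : p.isEmpty = false := by cases p <;> simp_all
  rw [this]
  simp only [Bool.false_eq_true, if_false]
  rw [go_eq_rep1 p r hp s.length s [] le_rfl]
  simp

-- a "block" is 7 chars: '#' then six non-'#' characters (Bool form, so `decide` is cheap)
def isBlockB (b : List Char) : Bool :=
  (b.length == 7) && (b.head? == some '#') && b.tail.all (fun c => c != '#')

def IsBlock (b : List Char) : Prop := isBlockB b = true

theorem isBlock_length {b : List Char} (h : IsBlock b) : b.length = 7 := by
  unfold IsBlock isBlockB at h
  simp only [Bool.and_eq_true, beq_iff_eq] at h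
  exact h.1.1

theorem isBlock_head {b : List Char} (h : IsBlock b) : b.head? = some '#' := by
  unfold IsBlock isBlockB at h
  simp only [Bool.and_eq_true, beq_iff_eq] at h
  exact h.1.2

theorem isBlock_tail {b : List Char} (h : IsBlock b) : ∀ c ∈ b.tail, c ≠ '#' := by
  unfold IsBlock isBlockB at h
  simp only [Bool.and_eq_true, List.all_eq_true, bne_iff_ne] at h
  exact h.2

def AllBlocks (L : List (List Char × List Char)) : Prop :=
  L.all (fun pr => isBlockB pr.1 && isBlockB pr.2) = true

theorem allBlocks_mem {L : List (List Char × List Char)} {pr : List Char × List Char}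
    (h : AllBlocks L) (hp : pr ∈ L) : IsBlock pr.1 ∧ IsBlock pr.2 := by
  unfold AllBlocks at h
  rw [List.all_eq_true] at h
  have := h pr hp
  rw [Bool.and_eq_true] at this
  exact ⟨this.1, this.2⟩

theorem allBlocks_cons {pr : List Char × List Char} {L' : List (List Char × List Char)}
    (h : AllBlocks (pr :: L')) : AllBlocks L' := by
  unfold AllBlocks at h ⊢
  rw [List.all_cons, Bool.and_eq_true] at h
  exact h.2

theorem pairsNe (L : List (List Char × List Char)) (k : List Char)
    (h : L.all (fun pr => pr.1 != k) = true) : ∀ pr ∈ L, pr.1 ≠ k := by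
  intro pr hp
  have := List.all_eq_true.mp h pr hp
  simpa using this

-- rep1 steps over a non-'#' head
theorem rep1_cons_ne_hash {p : List Char} (r : List Char) {c : Char} (t : List Char)
    (hp : p.head? = some '#') (hc : c ≠ '#') :
    rep1 p r (c :: t) = c :: rep1 p r t := by
  rw [rep1]
  have : ¬ p.isPrefixOf (c :: t) := by
    intro h
    rcases p with _ | ⟨a, p'⟩
    · simp at hp
    · simp only [List.head?_cons, Option.some.injEq] at hp
      rw [List.isPrefixOf_iff_prefix, List.cons_prefix_cons] at h
      exact hc (hp ▸ h.1.symm)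
  simp [this]

-- rep1 steps over an unmatched '#' head
theorem rep1_cons_hash_nomatch {p : List Char} (r : List Char) (t : List Char)
    (h : ¬ p <+: ('#' :: t)) :
    rep1 p r ('#' :: t) = '#' :: rep1 p r t := by
  rw [rep1]
  have : ¬ p.isPrefixOf ('#' :: t) := by
    rw [List.isPrefixOf_iff_prefix]; exact h
  simp [this]

-- rep1 passes over any run of non-'#' characters
theorem rep1_append_no_hash {p : List Char} (r : List Char) {w : List Char} (X : List Char)
    (hp : p.head? = some '#') (hw : ∀ c ∈ w, c ≠ '#') :
    rep1 p r (w ++ X) = w ++ rep1 p r X := by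
  induction w with
  | nil => simp
  | cons c w' ih =>
    have hc : c ≠ '#' := hw c (by simp)
    rw [List.cons_append, rep1_cons_ne_hash r _ hp hc,
      ih (fun d hd => hw d (by simp [hd]))]
    rfl

-- rep1 passes over a block different from its own pattern
theorem rep1_skip_block {q : List Char} (v : List Char) {b : List Char} (X : List Char)
    (hq : IsBlock q) (hb : IsBlock b) (hne : q ≠ b) :
    rep1 q v (b ++ X) = b ++ rep1 q v X := by
  have hbl := isBlock_length hb
  have hbh := isBlock_head hb
  have hbt := isBlock_tail hb
  rcases b with _ | ⟨c, b'⟩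
  · simp at hbl
  simp only [List.head?_cons, Option.some.injEq] at hbh
  subst hbh
  have hnp : ¬ q <+: (('#' :: b') ++ X) := by
    intro h
    have hql : q.length = 7 := isBlock_length hq
    have hq7 : q = List.take q.length (('#' :: b') ++ X) := List.prefix_iff_eq_take.mp h
    rw [hql] at hq7
    have h7 : ('#' :: b').length = 7 := hbl
    rw [← h7, List.take_left] at hq7
    exact hne hq7
  rw [List.cons_append, rep1_cons_hash_nomatch v _ (by rw [← List.cons_append]; exact hnp),
    rep1_append_no_hash v X (isBlock_head hq) (fun c hc => hbt c (by simpa using hc))]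
  rfl

-- rep1 consumes its own pattern at the head
theorem rep1_self {k : List Char} (v : List Char) (X : List Char) (hk : IsBlock k) :
    rep1 k v (k ++ X) = v ++ rep1 k v X := by
  rcases k with _ | ⟨c, k'⟩
  · exact absurd (isBlock_length hk) (by simp)
  have hpre : (c :: k').isPrefixOf (c :: (k' ++ X)) := by
    rw [List.isPrefixOf_iff_prefix, ← List.cons_append]
    exact List.prefix_append _ _
  rw [List.cons_append, rep1]
  simp only [hpre, if_true]
  have hl : (c :: k').length - 1 = k'.length := by simp
  rw [hl, List.drop_left]

-- prefixes without '#' survive rep1 backwards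
theorem no_hash_prefix_rep1 {q v : List Char}
    (hv : v.head? = some '#') :
    ∀ (X w : List Char), (∀ c ∈ w, c ≠ '#') → w <+: rep1 q v X → w <+: X := by
  intro X
  induction X using rep1.induct q with
  | case1 =>
    intro w _ h
    rw [rep1] at h
    exact h
  | case2 c t hpre ih =>
    intro w hw h
    rw [rep1] at h
    simp only [hpre, if_true] at h
    rcases w with _ | ⟨a, w'⟩
    · exact List.nil_prefix
    · exfalso
      rcases v with _ | ⟨vc, v'⟩
      · simp at hv
      simp only [List.head?_cons, Option.some.injEq] at hv
      rw [List.cons_append, List.cons_prefix_cons] at h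
      exact hw a (by simp) (h.1.trans hv)
  | case3 c t hpre ih =>
    intro w hw h
    rw [rep1] at h
    simp only [hpre, Bool.false_eq_true, if_false] at h
    rcases w with _ | ⟨a, w'⟩
    · exact List.nil_prefix
    · rw [List.cons_prefix_cons] at h ⊢
      exact ⟨h.1, ih w' (fun d hd => hw d (by simp [hd])) h.2⟩

-- all six (pattern, value) pairs, as char lists
def LCpairs : List (List Char × List Char) :=
  [("#F8F9FA".toList, "#000000".toList), ("#FFFFFF".toList, "#000000".toList),
   ("#202124".toList, "#FFFFFF".toList), ("#A020F0".toList, "#FFFF00".toList),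
   ("#E8EAED".toList, "#FFFFFF".toList), ("#DADCE0".toList, "#FFFFFF".toList)]

theorem chainL_cons_ne_hash {L : List (List Char × List Char)} {c : Char} (X : List Char)
    (hL : AllBlocks L) (hc : c ≠ '#') :
    chainL L (c :: X) = c :: chainL L X := by
  induction L generalizing X with
  | nil => rfl
  | cons pr L' ih =>
    have hpr := allBlocks_mem hL (List.mem_cons_self ..)
    rw [chainL, List.foldl_cons, rep1_cons_ne_hash pr.2 X (isBlock_head hpr.1) hc]
    exact ih _ (allBlocks_cons hL)

theorem chainL_cons_hash_nomatch {L : List (List Char × List Char)} (X : List Char)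
    (hL : AllBlocks L) (h : ∀ pr ∈ L, ¬ pr.1 <+: ('#' :: X)) :
    chainL L ('#' :: X) = '#' :: chainL L X := by
  induction L generalizing X with
  | nil => rfl
  | cons pr L' ih =>
    have hpr := allBlocks_mem hL (List.mem_cons_self ..)
    rw [chainL, List.foldl_cons, rep1_cons_hash_nomatch pr.2 X (h pr (by simp))]
    have hL' := allBlocks_cons hL
    have hnm : ∀ p ∈ L', ¬ p.1 <+: ('#' :: rep1 pr.1 pr.2 X) := by
      intro p hp hcontra
      have hpb := (allBlocks_mem hL (List.mem_cons_of_mem _ hp)).1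
      rcases hq : p.1 with _ | ⟨a, w⟩
      · have := isBlock_length hpb; simp [hq] at this
      rw [hq] at hcontra
      have ha : a = '#' := by
        have := isBlock_head hpb; simp [hq] at this; exact this
      subst ha
      rw [List.cons_prefix_cons] at hcontra
      have hw : w <+: X :=
        no_hash_prefix_rep1 (isBlock_head hpr.2) X w
          (fun d hd => isBlock_tail hpb d (by simp [hq, hd])) hcontra.2
      exact h p (by simp [hp]) (by rw [hq, List.cons_prefix_cons]; exact ⟨rfl, hw⟩)
    exact ih _ hL' hnm

theorem chainL_skip_block {L : List (List Char × List Char)} {b : List Char} (X : List Char)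
    (hL : AllBlocks L) (hb : IsBlock b) (hne : ∀ pr ∈ L, pr.1 ≠ b) :
    chainL L (b ++ X) = b ++ chainL L X := by
  induction L generalizing X with
  | nil => rfl
  | cons pr L' ih =>
    have hpr := allBlocks_mem hL (List.mem_cons_self ..)
    rw [chainL, List.foldl_cons, rep1_skip_block pr.2 X hpr.1 hb (hne pr (by simp))]
    exact ih (rep1 pr.1 pr.2 X) (allBlocks_cons hL) (fun p hp => hne p (by simp [hp]))

theorem chainL_match {L1 L2 : List (List Char × List Char)} {k v : List Char} (X : List Char)
    (hL1 : AllBlocks L1) (hL2 : AllBlocks L2) (hk : IsBlock k) (hv : IsBlock v)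
    (h1 : ∀ pr ∈ L1, pr.1 ≠ k) (h2 : ∀ pr ∈ L2, pr.1 ≠ v) :
    chainL (L1 ++ (k, v) :: L2) (k ++ X) = v ++ chainL (L1 ++ (k, v) :: L2) X := by
  have e1 : ∀ Y, chainL (L1 ++ (k, v) :: L2) Y = chainL L2 (rep1 k v (chainL L1 Y)) := by
    intro Y
    rw [chainL, List.foldl_append, List.foldl_cons]
    rfl
  rw [e1, e1, chainL_skip_block X hL1 hk h1, rep1_self v _ hk,
    chainL_skip_block _ hL2 hv h2]

theorem chain_key (L1 L2 : List (List Char × List Char)) (k v : List Char) (X : List Char)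
    (hL1 : AllBlocks L1) (hL2 : AllBlocks L2) (hk : IsBlock k) (hv : IsBlock v)
    (h1 : ∀ pr ∈ L1, pr.1 ≠ k) (h2 : ∀ pr ∈ L2, pr.1 ≠ v)
    (hsplit : LCpairs = L1 ++ (k, v) :: L2) :
    chainL LCpairs (k ++ X) = v ++ chainL LCpairs X := by
  rw [hsplit]
  exact chainL_match X hL1 hL2 hk hv h1 h2

-- the A port, as chainL over the concrete pairs
theorem portA_toList (s : String) :
    (apply_high_contrast_modifications_py s).toList = chainL LCpairs s.toList := by
  rw [apply_high_contrast_modifications_py]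
  show (List.foldl _ s _).toList = _
  simp only [hcA, List.foldl_cons, List.foldl_nil]
  rw [chainL]
  simp only [LCpairs, List.foldl_cons, List.foldl_nil]
  simp only [PySem.Str.toList_replace]
  rw [replace_eq_rep1 _ _ _ (by decide)]
  rw [replace_eq_rep1 _ _ _ (by decide)]
  rw [replace_eq_rep1 _ _ _ (by decide)]
  rw [replace_eq_rep1 _ _ _ (by decide)]
  rw [replace_eq_rep1 _ _ _ (by decide)]
  rw [replace_eq_rep1 _ _ _ (by decide)]

theorem lc_blocks : AllBlocks LCpairs := by
  unfold AllBlocks isBlockB LCpairs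
  decide

-- a successful 7-slice lookup identifies equally slice and value
theorem get?_some_cases {u v : String} (h : hcB.get? u = some v) :
    (u = "#F8F9FA" ∧ v = "#000000") ∨ (u = "#FFFFFF" ∧ v = "#000000") ∨
    (u = "#202124" ∧ v = "#FFFFFF") ∨ (u = "#A020F0" ∧ v = "#FFFF00") ∨
    (u = "#E8EAED" ∧ v = "#FFFFFF") ∨ (u = "#DADCE0" ∧ v = "#FFFFFF") := by
  simp only [hcB, PySem.Dict.get?_mk_cons, beq_iff_eq] at h
  split_ifs at h with h1 h2 h3 h4 h5 h6
  · exact Or.inl ⟨h1.symm, by simpa using h.symm⟩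
  · exact Or.inr (Or.inl ⟨h2.symm, by simpa using h.symm⟩)
  · exact Or.inr (Or.inr (Or.inl ⟨h3.symm, by simpa using h.symm⟩))
  · exact Or.inr (Or.inr (Or.inr (Or.inl ⟨h4.symm, by simpa using h.symm⟩)))
  · exact Or.inr (Or.inr (Or.inr (Or.inr (Or.inl ⟨h5.symm, by simpa using h.symm⟩))))
  · exact Or.inr (Or.inr (Or.inr (Or.inr (Or.inr ⟨h6.symm, by simpa using h.symm⟩))))
  · simp [PySem.Dict.get?] at h

theorem take7_of_prefix {k s : List Char} (hk : k.length = 7) (h : k <+: s) :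
    List.take 7 s = k := by
  rw [List.prefix_iff_eq_take] at h
  rw [← hk, ← h]

theorem drop7_cons (c : Char) (t : List Char) : List.drop 7 (c :: t) = List.drop 6 t := by
  simp [List.drop_succ_cons]

-- main lemma: the six-pass chain equals the single scan
theorem chain_eq_scan : ∀ s : List Char, chainL LCpairs s = hcScan s := by
  intro s
  induction s using hcScan.induct with
  | case1 =>
    rw [hcScan]
    simp [chainL, LCpairs, rep1_nil]
  | case2 c t v hget ih =>
    rw [hcScan, hget]
    rcases get?_some_cases hget with ⟨hu, hv⟩ | ⟨hu, hv⟩ | ⟨hu, hv⟩ | ⟨hu, hv⟩ | ⟨hu, hv⟩ | ⟨hu, hv⟩ <;> subst hv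
    · have h7 := congrArg String.toList hu
      rw [String.toList_ofList] at h7
      conv_lhs => rw [← List.take_append_drop 7 (c :: t), h7, drop7_cons]
      rw [chain_key [] (LCpairs.drop 1) ("#F8F9FA".toList) ("#000000".toList) (List.drop 6 t)
        (by unfold AllBlocks isBlockB; decide) (by unfold AllBlocks isBlockB; decide)
        (by unfold IsBlock isBlockB; decide) (by unfold IsBlock isBlockB; decide)
        (pairsNe _ _ (by decide)) (pairsNe _ _ (by decide)) (by decide), ih]
    · have h7 := congrArg String.toList hu
      rw [String.toList_ofList] at h7
      conv_lhs => rw [← List.take_append_drop 7 (c :: t), h7, drop7_cons]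
      rw [chain_key (LCpairs.take 1) (LCpairs.drop 2) ("#FFFFFF".toList) ("#000000".toList) (List.drop 6 t)
        (by unfold AllBlocks isBlockB; decide) (by unfold AllBlocks isBlockB; decide)
        (by unfold IsBlock isBlockB; decide) (by unfold IsBlock isBlockB; decide)
        (pairsNe _ _ (by decide)) (pairsNe _ _ (by decide)) (by decide), ih]
    · have h7 := congrArg String.toList hu
      rw [String.toList_ofList] at h7
      conv_lhs => rw [← List.take_append_drop 7 (c :: t), h7, drop7_cons]
      rw [chain_key (LCpairs.take 2) (LCpairs.drop 3) ("#202124".toList) ("#FFFFFF".toList) (List.drop 6 t)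
        (by unfold AllBlocks isBlockB; decide) (by unfold AllBlocks isBlockB; decide)
        (by unfold IsBlock isBlockB; decide) (by unfold IsBlock isBlockB; decide)
        (pairsNe _ _ (by decide)) (pairsNe _ _ (by decide)) (by decide), ih]
    · have h7 := congrArg String.toList hu
      rw [String.toList_ofList] at h7
      conv_lhs => rw [← List.take_append_drop 7 (c :: t), h7, drop7_cons]
      rw [chain_key (LCpairs.take 3) (LCpairs.drop 4) ("#A020F0".toList) ("#FFFF00".toList) (List.drop 6 t)
        (by unfold AllBlocks isBlockB; decide) (by unfold AllBlocks isBlockB; decide)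
        (by unfold IsBlock isBlockB; decide) (by unfold IsBlock isBlockB; decide)
        (pairsNe _ _ (by decide)) (pairsNe _ _ (by decide)) (by decide), ih]
    · have h7 := congrArg String.toList hu
      rw [String.toList_ofList] at h7
      conv_lhs => rw [← List.take_append_drop 7 (c :: t), h7, drop7_cons]
      rw [chain_key (LCpairs.take 4) (LCpairs.drop 5) ("#E8EAED".toList) ("#FFFFFF".toList) (List.drop 6 t)
        (by unfold AllBlocks isBlockB; decide) (by unfold AllBlocks isBlockB; decide)
        (by unfold IsBlock isBlockB; decide) (by unfold IsBlock isBlockB; decide)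
        (pairsNe _ _ (by decide)) (pairsNe _ _ (by decide)) (by decide), ih]
    · have h7 := congrArg String.toList hu
      rw [String.toList_ofList] at h7
      conv_lhs => rw [← List.take_append_drop 7 (c :: t), h7, drop7_cons]
      rw [chain_key (LCpairs.take 5) [] ("#DADCE0".toList) ("#FFFFFF".toList) (List.drop 6 t)
        (by unfold AllBlocks isBlockB; decide) (by unfold AllBlocks isBlockB; decide)
        (by unfold IsBlock isBlockB; decide) (by unfold IsBlock isBlockB; decide)
        (pairsNe _ _ (by decide)) (pairsNe _ _ (by decide)) (by decide), ih]
  | case3 c t hget ih =>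
    rw [hcScan, hget]
    have hnm : ∀ pr ∈ LCpairs, ¬ pr.1 <+: (c :: t) := by
      intro pr hpr hcontra
      have hlen : pr.1.length = 7 := isBlock_length (allBlocks_mem lc_blocks hpr).1
      have h7 : List.take 7 (c :: t) = pr.1 := take7_of_prefix hlen hcontra
      rw [h7] at hget
      simp only [LCpairs, List.mem_cons, List.not_mem_nil, or_false] at hpr
      rcases hpr with h | h | h | h | h | h <;>
        · rw [h] at hget
          rw [String.ofList_toList] at hget
          revert hget
          decide
    by_cases hc : c = '#'
    · subst hc
      rw [chainL_cons_hash_nomatch t lc_blocks hnm, ih]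
    · rw [chainL_cons_ne_hash t lc_blocks hc, ih]

-- ===== VERDICT (by name: the statement is the Claim_ definition above) =====
theorem apply_high_contrast_modifications_py_spec : Claim_equal_apply_high_contrast_modifications_py := by
  intro s _
  unfold Spec_apply_high_contrast_modifications_py
  rw [apply_high_contrast_modifications_py_alt, ← chain_eq_scan, ← portA_toList,
    String.ofList_toList]
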